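-- pv_equiv track=rewrite | github.com/dawidbo/algorithms | Codility/cyclickRotation.py | solution
-- ===== SOURCE A (Python) =====
-- def solution(A, K):
--     N = len(A)
--     j = 0
--     while j<K:
--         for i in range(N):
--             A[i],A[N-1]=A[N-1],A[i]
--         j+=1
--     return A
-- ===== SOURCE B (Python) =====
-- def solution(A, K):
--     # Closed-form O(N) rotation: A performs K full swap passes (one right
--     # rotation each); B rotates once by K % N via slicing (in place, like A).
--     N = len(A)
--     if N == 0 or K <= 0:
--         return A
--     k = K % N
--     A[:] = A[N - k:] + A[:N - k]
--     return A
-- ===== Notes on version B (the rewrite author's own statement) =====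
-- stated objective: faster
-- what changed: A performs K full passes of pairwise swaps (each pass is one right rotation); B computes k = K % N once and builds the rotated list with two slices, mutating A in place just as A does.
import Mathlib
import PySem

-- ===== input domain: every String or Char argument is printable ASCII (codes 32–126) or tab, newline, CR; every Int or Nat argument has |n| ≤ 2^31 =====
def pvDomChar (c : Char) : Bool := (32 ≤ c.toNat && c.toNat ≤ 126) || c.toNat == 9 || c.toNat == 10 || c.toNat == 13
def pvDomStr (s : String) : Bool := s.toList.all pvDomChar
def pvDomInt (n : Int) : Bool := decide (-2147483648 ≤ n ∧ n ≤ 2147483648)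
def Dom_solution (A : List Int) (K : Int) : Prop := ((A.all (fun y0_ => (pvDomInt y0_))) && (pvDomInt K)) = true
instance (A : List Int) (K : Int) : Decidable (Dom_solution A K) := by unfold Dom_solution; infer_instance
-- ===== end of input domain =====

-- B replaces A's K swap-passes (each pass is one right rotation) by a single slice-based rotation by K % N; the equality proved is about the return value (both Pythons also mutate A in place, identically).


-- ===== PORT A =====
-- one iteration of A's 'for i in range(N)' loop body sequence: swap A[i], A[N-1] for each i
def solPass (A : List Int) : List Int :=
  let N : Int := A.length
  (PySem.List.pyRange 0 N 1).foldl
    (fun acc i =>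
      let t1 := PySem.List.pyGetD acc (N - 1) 0   -- A[N-1], read before the assignments
      let t2 := PySem.List.pyGetD acc i 0         -- A[i]
      PySem.List.pySetD (PySem.List.pySetD acc i t1) (N - 1) t2) A

-- the 'while j < K' loop
def solLoop (A : List Int) (K j : Int) : List Int :=
  if _h : j < K then solLoop (solPass A) K (j + 1) else A
termination_by (K - j).toNat
decreasing_by omega

def solution (A : List Int) (K : Int) : List Int :=
  solLoop A K 0

-- ===== PORT B =====
def solution_alt (A : List Int) (K : Int) : List Int :=
  let N : Int := A.length
  if N = 0 ∨ K ≤ 0 then A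
  else
    let k := PySem.Int.mod K N
    PySem.List.slice A (some (N - k)) none ++ PySem.List.slice A none (some (N - k))

-- ===== PRECONDITION & SPEC =====
def Spec_solution (A : List Int) (K : Int) (out : List Int) : Prop := out = solution_alt A K
instance (A : List Int) (K : Int) (out : List Int) : Decidable (Spec_solution A K out) := by unfold Spec_solution; infer_instance

-- ===== CLAIM (what is proved, stated in full; the proofs are below) =====
def Claim_equal_solution : Prop := ∀ (A : List Int) (K : Int), Dom_solution A K → Spec_solution A K (solution A K)

-- ===== LEMMAS AND PROOFS =====

-- Nat-indexed form of one swap of A's inner loop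
def stepNat (n : Nat) (acc : List Int) (k : Nat) : List Int :=
  (acc.set k (acc.getD (n-1) 0)).set (n-1) (acc.getD k 0)

theorem length_stepNat (n : Nat) (L : List Int) (k : Nat) : (stepNat n L k).length = L.length := by
  simp [stepNat]

theorem getD_stepNat (n : Nat) (L : List Int) (hL : L.length = n) (k j : Nat) (hj : j < n) :
    (stepNat n L k).getD j 0 =
      if j = n - 1 then L.getD k 0 else if j = k then L.getD (n-1) 0 else L.getD j 0 := by
  by_cases h1 : j = n - 1
  · subst h1
    rw [stepNat, List.getD_eq_getElem?_getD, List.getElem?_set_self (by simp [hL]; omega), if_pos rfl]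
    simp
  · rw [stepNat, List.getD_eq_getElem?_getD, List.getElem?_set_ne (by omega)]
    by_cases h2 : j = k
    · subst h2
      rw [List.getElem?_set_self (by omega), if_neg h1, if_pos rfl]
      simp
    · rw [List.getElem?_set_ne (by omega), if_neg h1, if_neg h2, List.getD_eq_getElem?_getD]

theorem length_foldl_stepNat (n : Nat) (is : List Nat) (L : List Int) :
    (is.foldl (stepNat n) L).length = L.length := by
  induction is generalizing L with
  | nil => rfl
  | cons a t ih => rw [List.foldl_cons, ih, length_stepNat]

-- loop invariant for A's inner loop after m of the N swaps (1 ≤ m ≤ N-1)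
theorem invF (A : List Int) (n : Nat) (hn : A.length = n) (h2 : 2 ≤ n) :
    ∀ m, 1 ≤ m → m ≤ n - 1 → ∀ j, j < n →
    ((List.range m).foldl (stepNat n) A).getD j 0 =
      (if j = 0 then A.getD (n-1) 0 else if j < m then A.getD (j-1) 0
       else if j = n-1 then A.getD (m-1) 0 else A.getD j 0) := by
  intro m
  induction m with
  | zero => omega
  | succ m ih =>
    intro _ hm j hj
    rw [List.range_succ, List.foldl_append, List.foldl_cons, List.foldl_nil]
    by_cases hm1 : m = 0
    · subst hm1
      simp only [List.range_zero, List.foldl_nil]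
      rw [getD_stepNat n A hn 0 j hj]
      split_ifs <;> first | rfl | omega
    · have hlen : ((List.range m).foldl (stepNat n) A).length = n := by
        rw [length_foldl_stepNat, hn]
      rw [getD_stepNat n _ hlen m j hj]
      have hmn : m < n - 1 := by omega
      by_cases hA : j = n - 1
      · rw [if_pos hA, ih (by omega) (by omega) m (by omega)]
        split_ifs <;> first | rfl | omega
      · rw [if_neg hA]
        by_cases hB : j = m
        · subst hB
          rw [if_pos rfl, ih (by omega) (by omega) (n-1) (by omega)]
          split_ifs <;> first | rfl | omega
        · rw [if_neg hB, ih (by omega) (by omega) j hj]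
          split_ifs <;> first | rfl | omega

theorem solPass_eq_foldl (A : List Int) :
    solPass A = (List.range A.length).foldl (stepNat A.length) A := by
  show (PySem.List.pyRange 0 (A.length : Int) 1).foldl _ A = _
  rw [PySem.List.pyRange_one, List.foldl_map]
  apply PySem.List.foldl_congr_mem
  intro acc k hk
  have hk' : k < A.length := by
    have := List.mem_range.mp hk
    omega
  have h1 : (0 : Int) + (k : Int) = ((k : Nat) : Int) := by omega
  have h2 : ((A.length : Int) - 1) = ((A.length - 1 : Nat) : Int) := by omega
  simp only [h1, h2, PySem.List.pyGetD_natCast, PySem.List.pySetD_natCast, stepNat]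

theorem solPass_eq_rotate (A : List Int) : solPass A = A.rotate (A.length - 1) := by
  by_cases h0 : A.length = 0
  · rw [List.length_eq_zero_iff] at h0
    subst h0
    simp [solPass]
  by_cases h1 : A.length = 1
  · obtain ⟨a, rfl⟩ := List.length_eq_one_iff.mp h1
    simp [solPass_eq_foldl, stepNat, List.rotate]
  have h2 : 2 ≤ A.length := by omega
  have hF : ((List.range (A.length - 1)).foldl (stepNat A.length) A).length = A.length :=
    length_foldl_stepNat _ _ _
  have hfold : solPass A =
      stepNat A.length ((List.range (A.length - 1)).foldl (stepNat A.length) A) (A.length - 1) := by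
    rw [solPass_eq_foldl, show List.range A.length = List.range ((A.length - 1) + 1) by congr 1; omega,
      List.range_succ, List.foldl_append, List.foldl_cons, List.foldl_nil]
  apply List.ext_getElem
  · rw [hfold, length_stepNat, hF, List.length_rotate]
  intro j hjl hjr
  rw [List.getElem_rotate]
  rw [hfold, length_stepNat, hF] at hjl
  rw [← List.getD_eq_getElem _ 0 (by rw [hfold, length_stepNat, hF]; exact hjl), hfold,
    getD_stepNat _ _ hF _ _ hjl]
  by_cases hj0 : j = 0
  · subst hj0
    rw [if_neg (by omega), if_neg (by omega),
      invF A A.length rfl h2 (A.length - 1) (by omega) (by omega) 0 (by omega),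
      if_pos rfl, List.getD_eq_getElem _ 0 (by omega)]
    congr 1
    rw [Nat.zero_add, Nat.mod_eq_of_lt (by omega)]
  · have hmod : (j + (A.length - 1)) % A.length = j - 1 := by
      rw [Nat.mod_eq_sub_mod (by omega), Nat.mod_eq_of_lt (by omega)]
      omega
    by_cases hjn : j = A.length - 1
    · rw [if_pos hjn,
        invF A A.length rfl h2 (A.length - 1) (by omega) (by omega) (A.length - 1) (by omega),
        if_neg (by omega), if_neg (by omega), if_pos rfl, List.getD_eq_getElem _ 0 (by omega)]
      congr 1
      omega
    · rw [if_neg hjn, if_neg hjn,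
        invF A A.length rfl h2 (A.length - 1) (by omega) (by omega) j hjl,
        if_neg hj0, if_pos (by omega), List.getD_eq_getElem _ 0 (by omega)]
      congr 1
      omega

theorem solLoop_eq_iterate (n : Nat) (A : List Int) (K j : Int) (h : (K - j).toNat = n) :
    solLoop A K j = solPass^[n] A := by
  induction n generalizing A j with
  | zero => rw [solLoop, dif_neg (by omega)]; rfl
  | succ n ih =>
    rw [solLoop, dif_pos (by omega), ih (solPass A) (j+1) (by omega),
      Function.iterate_succ_apply]

theorem iterate_solPass (n : Nat) (A : List Int) :
    solPass^[n] A = A.rotate ((n * (A.length - 1)) % A.length) := by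
  induction n generalizing A with
  | zero => simp
  | succ n ih =>
    rcases A with _ | ⟨a, t⟩
    · rw [Function.iterate_succ_apply, show solPass [] = [] from rfl, ih]
      simp
    · set A := a :: t with hA
      have hpos : 0 < A.length := by simp [hA]
      have hl : (solPass A).length = A.length := by rw [solPass_eq_rotate, List.length_rotate]
      rw [Function.iterate_succ_apply, ih, hl, solPass_eq_rotate, List.rotate_rotate]
      have key : (A.length - 1 + n * (A.length - 1) % A.length) % A.length
          = ((n + 1) * (A.length - 1)) % A.length := by
        have step1 : A.length - 1 + n * (A.length - 1) % A.length
            ≡ (n + 1) * (A.length - 1) [MOD A.length] := by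
          calc A.length - 1 + n * (A.length - 1) % A.length
              ≡ A.length - 1 + n * (A.length - 1) [MOD A.length] :=
                Nat.ModEq.add_left _ (Nat.mod_modEq _ _)
            _ = (n + 1) * (A.length - 1) := by ring
        exact step1
      rw [← List.rotate_mod, key, List.rotate_mod]

-- ===== VERDICT (by name: the statement is the Claim_ definition above) =====
-- the central modular-arithmetic fact: K passes of right-rotation-by-one equal one rotation by K mod N
theorem rotation_count_mod (Kn n0 : Nat) (h : 0 < n0) :
    (Kn * (n0 - 1)) % n0 = (n0 - Kn % n0) % n0 := by
  obtain ⟨m, rfl⟩ : ∃ m, n0 = m + 1 := ⟨n0 - 1, by omega⟩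
  have hr : Kn % (m + 1) < m + 1 := Nat.mod_lt _ h
  have step1 : Kn * (m + 1 - 1) ≡ (Kn % (m + 1)) * (m + 1 - 1) [MOD m + 1] :=
    Nat.ModEq.mul_right _ (Nat.mod_modEq _ _).symm
  have e1 : (Kn % (m + 1)) * (m + 1 - 1) + Kn % (m + 1) = (Kn % (m + 1)) * (m + 1) := by
    simp only [Nat.add_sub_cancel]
    ring
  have e2 : (m + 1 - Kn % (m + 1)) + Kn % (m + 1) = m + 1 := by omega
  have h3 : (Kn % (m + 1)) * (m + 1) ≡ m + 1 [MOD m + 1] := by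
    unfold Nat.ModEq
    simp [Nat.mul_mod_left]
  have step2 : (Kn % (m + 1)) * (m + 1 - 1) ≡ m + 1 - Kn % (m + 1) [MOD m + 1] :=
    Nat.ModEq.add_right_cancel' (Kn % (m + 1)) (by rw [e1, e2]; exact h3)
  exact step1.trans step2

-- ===== VERDICT (by name: the statement is the Claim_ definition above) =====
theorem solution_spec : Claim_equal_solution := by
  intro A K _
  show solution A K = solution_alt A K
  rw [solution, solLoop_eq_iterate K.toNat A K 0 (by omega), iterate_solPass]
  by_cases hN : A.length = 0
  · rw [List.length_eq_zero_iff] at hN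
    subst hN
    simp [solution_alt]
  by_cases hK : K ≤ 0
  · rw [show K.toNat = 0 by omega]
    simp [solution_alt, hK]
  have hpos : 0 < A.length := by omega
  have hKpos : 0 < K := by omega
  have hne : ¬(((A.length : Int) = 0) ∨ K ≤ 0) := by
    rintro (h | h)
    · exact hN (by exact_mod_cast h)
    · omega
  have hm : PySem.Int.mod K (A.length : Int) = ((K.toNat % A.length : Nat) : Int) := by
    rw [PySem.Int.mod_eq_emod_of_pos (by exact_mod_cast hpos),
      show K = ((K.toNat : Nat) : Int) from (Int.toNat_of_nonneg (by omega)).symm]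
    exact_mod_cast (Int.natCast_mod K.toNat A.length).symm
  have hlt : K.toNat % A.length < A.length := Nat.mod_lt _ hpos
  have hsub : (A.length : Int) - ((K.toNat % A.length : Nat) : Int)
      = ((A.length - K.toNat % A.length : Nat) : Int) := by omega
  simp only [solution_alt, if_neg hne, hm, hsub, PySem.List.slice_from_natCast,
    PySem.List.slice_to_natCast]
  rw [← List.rotate_eq_drop_append_take (by omega),
    rotation_count_mod K.toNat A.length hpos]
  exact List.rotate_mod A _
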